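-- pv_equiv track=rewrite | github.com/mesquitadev/caminho-critico | sgs_caminho_critico/service/GraphService.py | set_node_status
-- ===== SOURCE A (Python) =====
-- def set_node_status(nodes_data):
--     held_nodes = [node for node in nodes_data if node.get('held')]
--     deleted_nodes = [node for node in nodes_data if node.get('deleted')]
--     abended_nodes = [node for node in nodes_data if node.get('mainstat') == 'Abended']
--     running_nodes = [node for node in nodes_data if node.get('mainstat') == 'Running']
--
--     if held_nodes:
--         return 4  # Job(s) em Held
--
--     if deleted_nodes:
--         return 7  # Job(s) deletado(s)
--
--     if len([node for node in nodes_data if node.get('mainstat') == 'Ended Ok']) == len(nodes_data):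
--         return 1  # Finalizado
--
--     if abended_nodes:
--         return 3  # Com abend(s)
--
--     if nodes_data and nodes_data[0].get('mainstat') == 'Ended Ok':
--         return 5  # Em execução
--
--     if running_nodes:
--         return 5  # Em execução
--
--     return 2  # Aguardando início
-- ===== SOURCE B (Python) =====
-- def set_node_status(nodes_data):
--     # Severity ranking: map each node to a severity rank, reduce by max, decode the
--     # winning rank to a status code (no branch cascade over whole-list predicates).
--     def rank(node):
--         if node.get('held'):
--             return 6
--         if node.get('deleted'):
--             return 5
--         ms = node.get('mainstat')
--         if ms == 'Abended':
--             return 4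
--         if ms == 'Running':
--             return 2
--         return 0 if ms == 'Ended Ok' else 1
--     r = max(map(rank, nodes_data), default=0)
--     if r == 1:
--         # some node is pending (not Ended Ok) and nothing more severe exists:
--         # running iff the first node already finished, else waiting to start
--         return 5 if nodes_data[0].get('mainstat') == 'Ended Ok' else 2
--     return {6: 4, 5: 7, 4: 3, 2: 5, 0: 1}[r]
-- ===== Notes on version B (the rewrite author's own statement) =====
-- stated objective: alternative
-- what changed: Replaces A's branch cascade over five whole-list comprehension scans with a map-reduce: each node is mapped to a severity rank, the ranks are reduced with max, and the winning rank is decoded through a lookup table (with one conditional decode for the pending rank).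
import Mathlib
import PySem

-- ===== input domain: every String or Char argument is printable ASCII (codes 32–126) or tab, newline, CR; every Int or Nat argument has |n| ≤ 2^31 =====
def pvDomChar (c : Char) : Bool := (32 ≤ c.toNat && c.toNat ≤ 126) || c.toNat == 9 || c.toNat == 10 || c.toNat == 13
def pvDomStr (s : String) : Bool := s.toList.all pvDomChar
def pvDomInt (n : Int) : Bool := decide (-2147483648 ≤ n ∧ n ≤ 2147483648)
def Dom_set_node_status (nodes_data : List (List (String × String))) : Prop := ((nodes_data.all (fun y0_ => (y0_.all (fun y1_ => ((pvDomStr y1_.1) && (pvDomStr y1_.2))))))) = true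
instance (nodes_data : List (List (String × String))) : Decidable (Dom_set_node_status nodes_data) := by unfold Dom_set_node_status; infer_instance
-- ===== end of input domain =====

-- B replaces A's branch cascade over five whole-list comprehension scans by a per-node
-- severity rank reduced with max and decoded through a table (objective: alternative, same O(n)).

-- ===== PORT A =====
-- node.get(k): first match in the association list (dict lookup; None if absent)
def pvGetKey (node : List (String × String)) (k : String) : Option String :=
  (node.find? (fun p => p.1 == k)).map (·.2)

-- Python truthiness of node.get(k): a present, non-empty string
def pvTruthy (o : Option String) : Bool :=
  match o with | some s => !(s == "") | none => false

def set_node_status (nodes_data : List (List (String × String))) : Int :=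
  let held_nodes := nodes_data.filter (fun node => pvTruthy (pvGetKey node "held"))
  let deleted_nodes := nodes_data.filter (fun node => pvTruthy (pvGetKey node "deleted"))
  let abended_nodes := nodes_data.filter (fun node => pvGetKey node "mainstat" == some "Abended")
  let running_nodes := nodes_data.filter (fun node => pvGetKey node "mainstat" == some "Running")
  if !held_nodes.isEmpty then 4
  else if !deleted_nodes.isEmpty then 7
  else if (nodes_data.filter (fun node => pvGetKey node "mainstat" == some "Ended Ok")).length == nodes_data.length then 1
  else if !abended_nodes.isEmpty then 3
  else if !nodes_data.isEmpty && (pvGetKey (nodes_data.headD []) "mainstat" == some "Ended Ok") then 5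
  else if !running_nodes.isEmpty then 5
  else 2

-- ===== PORT B =====
-- per-node severity rank (Source B's inner `rank`)
def pvRank (node : List (String × String)) : Int :=
  if pvTruthy (pvGetKey node "held") then 6
  else if pvTruthy (pvGetKey node "deleted") then 5
  else if pvGetKey node "mainstat" == some "Abended" then 4
  else if pvGetKey node "mainstat" == some "Running" then 2
  else if pvGetKey node "mainstat" == some "Ended Ok" then 0
  else 1

def set_node_status_alt (nodes_data : List (List (String × String))) : Int :=
  let r := (nodes_data.map pvRank).foldl max 0   -- max(map(rank, nodes_data), default=0)
  if r == 1 then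
    -- r = 1 forces nodes_data ≠ [], so nodes_data[0] cannot raise (headD's default unreachable)
    (if pvGetKey (nodes_data.headD []) "mainstat" == some "Ended Ok" then 5 else 2)
  else
    -- {6:4, 5:7, 4:3, 2:5, 0:1}[r]; r is always one of the keys here, KeyError unreachable (getD default unused)
    ((PySem.Dict.ofList [((6:Int),(4:Int)), (5,7), (4,3), (2,5), (0,1)]).get? r).getD 0

-- ===== PRECONDITION & SPEC =====
def Spec_set_node_status (nodes_data : List (List (String × String))) (out : Int) : Prop := out = set_node_status_alt nodes_data
instance (nodes_data : List (List (String × String))) (out : Int) : Decidable (Spec_set_node_status nodes_data out) := by unfold Spec_set_node_status; infer_instance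

-- ===== CLAIM (what is proved, stated in full; the proofs are below) =====
def Claim_equal_set_node_status : Prop := ∀ (nodes_data : List (List (String × String))), Dom_set_node_status nodes_data → Spec_set_node_status nodes_data (set_node_status nodes_data)

-- ===== LEMMAS AND PROOFS =====

-- A's five aggregate predicates, as a cascade value: what B's max of ranks computes
def pvCascade (xs : List (List (String × String))) : Int :=
  if xs.any (fun n => pvTruthy (pvGetKey n "held")) then 6
  else if xs.any (fun n => pvTruthy (pvGetKey n "deleted")) then 5
  else if xs.any (fun n => pvGetKey n "mainstat" == some "Abended") then 4
  else if xs.any (fun n => pvGetKey n "mainstat" == some "Running") then 2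
  else if xs.all (fun n => pvGetKey n "mainstat" == some "Ended Ok") then 0
  else 1

lemma pvCascade_bounds (xs : List (List (String × String))) :
    0 ≤ pvCascade xs ∧ pvCascade xs ≤ 6 := by
  unfold pvCascade; split_ifs <;> omega

lemma pvRank_bounds (n : List (String × String)) : 0 ≤ pvRank n ∧ pvRank n ≤ 6 := by
  unfold pvRank; split_ifs <;> omega

set_option maxHeartbeats 2000000 in
lemma pvCascade_cons (n : List (String × String)) (xs : List (List (String × String))) :
    pvCascade (n :: xs) = max (pvRank n) (pvCascade xs) := by
  unfold pvCascade pvRank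
  simp only [List.any_cons, List.all_cons]
  by_cases h1 : pvTruthy (pvGetKey n "held") <;>
  by_cases h2 : pvTruthy (pvGetKey n "deleted") <;>
  by_cases h3 : pvGetKey n "mainstat" == some "Abended" <;>
  by_cases h4 : pvGetKey n "mainstat" == some "Running" <;>
  by_cases h5 : pvGetKey n "mainstat" == some "Ended Ok" <;>
  simp only [h1, h2, h3, h4, h5, Bool.true_or, Bool.false_or, Bool.true_and, Bool.false_and,
    if_true] <;>
  simp only [Int.max_def] <;> split_ifs <;> first | omega | simp_all

lemma pvFoldlMax_eq_cascade (xs : List (List (String × String))) :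
    (xs.map pvRank).foldl max 0 = pvCascade xs := by
  suffices h : ∀ (c : Int), 0 ≤ c → c ≤ 6 → (xs.map pvRank).foldl max c = max c (pvCascade xs) by
    have := h 0 le_rfl (by omega)
    rw [this]
    exact max_eq_right (pvCascade_bounds xs).1
  induction xs with
  | nil => intro c _ _; simp [pvCascade]; omega
  | cons n t ih =>
    intro c hc0 hc6
    have hr := pvRank_bounds n
    simp only [List.map_cons, List.foldl_cons]
    rw [ih (max c (pvRank n)) (by omega) (by omega), pvCascade_cons]
    omega

lemma pv_filter_not_isEmpty {α : Type} (l : List α) (p : α → Bool) :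
    (!(l.filter p).isEmpty) = l.any p := by
  induction l with
  | nil => simp
  | cons a l ih => by_cases hp : p a <;> simp [hp, ih]

lemma pv_count_eq_all (xs : List (List (String × String))) :
    (((xs.filter (fun node => pvGetKey node "mainstat" == some "Ended Ok")).length == xs.length) : Bool)
      = xs.all (fun n => pvGetKey n "mainstat" == some "Ended Ok") := by
  by_cases h : xs.all (fun n => pvGetKey n "mainstat" == some "Ended Ok")
  · have : xs.filter (fun n => pvGetKey n "mainstat" == some "Ended Ok") = xs :=
      List.filter_eq_self.mpr (by simpa [List.all_eq_true] using h)
    simp [this, h]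
  · have hex : ∃ a ∈ xs, ¬ (pvGetKey a "mainstat" == some "Ended Ok") = true := by
      simpa [List.all_eq_true] using h
    have hlt := List.length_filter_lt_length_iff_exists.mpr hex
    simp [h, Nat.ne_of_lt hlt]

-- a node whose mainstat is 'Ended Ok' is neither Abended nor Running
lemma pv_ok_excl (n : List (String × String)) (h : (pvGetKey n "mainstat" == some "Ended Ok") = true) :
    (pvGetKey n "mainstat" == some "Abended") = false ∧
    (pvGetKey n "mainstat" == some "Running") = false := by
  have := beq_iff_eq.mp h
  simp [this]

lemma pv_all_ok_no_ab (xs : List (List (String × String)))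
    (h : xs.all (fun n => pvGetKey n "mainstat" == some "Ended Ok") = true) :
    xs.any (fun n => pvGetKey n "mainstat" == some "Abended") = false := by
  simp only [List.any_eq_false]
  intro n hn
  exact (by simpa using (pv_ok_excl n (List.all_eq_true.mp h n hn)).1)

lemma pv_all_ok_no_run (xs : List (List (String × String)))
    (h : xs.all (fun n => pvGetKey n "mainstat" == some "Ended Ok") = true) :
    xs.any (fun n => pvGetKey n "mainstat" == some "Running") = false := by
  simp only [List.any_eq_false]
  intro n hn
  exact (by simpa using (pv_ok_excl n (List.all_eq_true.mp h n hn)).2)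

lemma pv_not_all_ne_nil (xs : List (List (String × String)))
    (h : xs.all (fun n => pvGetKey n "mainstat" == some "Ended Ok") = false) :
    xs.isEmpty = false := by
  cases xs <;> simp_all

-- ===== VERDICT (by name: the statement is the Claim_ definition above) =====
theorem set_node_status_spec : Claim_equal_set_node_status := by
  intro xs _
  unfold Spec_set_node_status set_node_status set_node_status_alt
  rw [pvFoldlMax_eq_cascade, pv_count_eq_all]
  simp only [pv_filter_not_isEmpty]
  unfold pvCascade
  by_cases hH : xs.any (fun n => pvTruthy (pvGetKey n "held"))
  · simp [hH]; decide
  by_cases hD : xs.any (fun n => pvTruthy (pvGetKey n "deleted"))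
  · simp [hH, hD]; decide
  by_cases hOk : xs.all (fun n => pvGetKey n "mainstat" == some "Ended Ok")
  · simp [hH, hD, hOk, pv_all_ok_no_ab xs hOk, pv_all_ok_no_run xs hOk]; decide
  by_cases hAb : xs.any (fun n => pvGetKey n "mainstat" == some "Abended")
  · simp [hH, hD, hOk, hAb]; decide
  have hne := pv_not_all_ne_nil xs (by simpa using hOk)
  by_cases hRun : xs.any (fun n => pvGetKey n "mainstat" == some "Running")
  · simp only [hH, hD, hOk, hAb, hRun, if_false, if_true, Bool.false_eq_true, hne, Bool.not_false,
      Bool.true_and]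
    by_cases hF : pvGetKey (xs.headD []) "mainstat" == some "Ended Ok"
    · simp only [hF, if_true]; decide
    · simp only [hF]; decide
  · simp only [hH, hD, hOk, hAb, hRun, if_false, Bool.false_eq_true, hne, Bool.not_false,
      Bool.true_and]
    by_cases hF : pvGetKey (xs.headD []) "mainstat" == some "Ended Ok"
    · simp only [hF, if_true]; decide
    · simp only [hF]; decide
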